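-- pv_equiv track=rewrite | github.com/seongun1/baekjoon | 프로그래머스/2/250136. ［PCCP 기출문제］ 2번 ／ 석유 시추/［PCCP 기출문제］ 2번 ／ 석유 시추.py | solution
-- ===== SOURCE A (Python) =====
-- from collections import deque
--
-- def solution(land):
--     answer = 0
--     col = len(land)
--     row = len(land[0])
--     land_per_row = [0] *(row)
--
--     visited= [[False] *row for _ in range(col)]
--
--     def dfs(x,y):
--         dx = [0,0,1,-1]
--         dy = [1,-1,0,0]
--         que = deque()
--         que.append((x,y))
--         count =0
--         visited[x][y] = True
--         arr =set()
--         arr.add(y)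
--         while (que):
--             count +=1
--             cur_x,cur_y = que.popleft()
--             for i in range(4): #현재위치에서 상하좌우만큼 탐색
--                 nx,ny = cur_x + dx[i],cur_y + dy[i]
--                 if (0<=nx <col and 0<=ny < row) and not visited[nx][ny] and land[nx][ny]:
--                     que.append((nx,ny))
--                     visited[nx][ny] = True
--                     arr.add(ny)
--         return count,arr
--     for y in range(row):
--         oil = 0
--         for x in range(col):
--             if not visited[x][y] and land[x][y]:
--                 oil,arr= dfs(x,y)
--                 for a in arr:
--                     land_per_row[a] += oil
--
--     return max(land_per_row)
-- ===== SOURCE B (Python) =====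
-- def solution(land):
--     col, row = len(land), len(land[0])
--     oilset = {(x, y) for x in range(col) for y in range(row) if land[x][y]}
--     totals = [0] * row
--     seen = set()
--     for z in sorted(oilset):
--         if z not in seen:
--             comp = {z}
--             frontier = {z}
--             while frontier:
--                 frontier = ({(x + dx, y + dy) for (x, y) in frontier
--                              for (dx, dy) in ((0, 1), (0, -1), (1, 0), (-1, 0))}
--                             & oilset) - comp
--                 comp |= frontier
--             seen |= comp
--             size = len(comp)
--             for c in {y for (_, y) in comp}:
--                 totals[c] += size
--     return max(totals)
-- ===== Notes on version B (the rewrite author's own statement) =====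
-- stated objective: alternative
-- what changed: Replaces the queue-based BFS with a shared visited matrix and per-column accumulation during a column-major scan by a pure set-algebra flood fill: the oil cells are collected into one set, each component is grown by whole-frontier set saturation (neighbours-of-frontier intersected with the oil set minus the component), and each component's size is added to the columns it touches; no deque and no boolean matrix are used.
import Mathlib
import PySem

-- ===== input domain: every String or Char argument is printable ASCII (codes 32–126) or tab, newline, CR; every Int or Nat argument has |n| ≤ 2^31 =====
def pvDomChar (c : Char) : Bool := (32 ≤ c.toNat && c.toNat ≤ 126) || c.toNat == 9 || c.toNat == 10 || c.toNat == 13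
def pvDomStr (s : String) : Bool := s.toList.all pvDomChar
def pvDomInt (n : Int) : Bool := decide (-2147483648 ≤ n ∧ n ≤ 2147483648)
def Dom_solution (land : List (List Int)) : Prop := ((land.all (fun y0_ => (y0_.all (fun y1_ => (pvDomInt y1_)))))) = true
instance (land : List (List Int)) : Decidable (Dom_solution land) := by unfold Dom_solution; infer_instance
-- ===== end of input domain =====

-- B replaces A's queue-BFS over a shared visited matrix by whole-frontier set saturation on one oil-cell
-- set (alternative algorithm, similar cost); equivalence is proved on the inputs where the Python A returns.

-- ===== PORT A =====

-- land[x][y]; Python raises on out-of-range access, which Pre_solution excludes, so the default is never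
-- the value read on an admitted run.
def pvCell (land : List (List Int)) (x y : Int) : Int :=
  PySem.List.pyGetD (PySem.List.pyGetD land x []) y 0

-- visited[x][y] (read)
def pvVget (v : List (List Bool)) (x y : Int) : Bool :=
  PySem.List.pyGetD (PySem.List.pyGetD v x []) y false

-- visited[x][y] = True (A only writes at indices 0 ≤ x < col, 0 ≤ y < row, where this is exact)
def pvVset (v : List (List Bool)) (x y : Int) : List (List Bool) :=
  PySem.List.pySetD v x (PySem.List.pySetD (PySem.List.pyGetD v x []) y true)

-- the four (dx[i], dy[i]) pairs of A, in loop order i = 0,1,2,3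
def pvDirs : List (Int × Int) := [(0, 1), (0, -1), (1, 0), (-1, 0)]

-- body of A's 'for i in range(4)' loop: state = (que-after-popleft, visited, arr)
def pvPush (land : List (List Int)) (col row cx cy : Int)
    (s : List (Int × Int) × List (List Bool) × PySem.Set Int) (d : Int × Int) :
    List (Int × Int) × List (List Bool) × PySem.Set Int :=
  let nx := cx + d.1
  let ny := cy + d.2
  if (0 ≤ nx ∧ nx < col ∧ 0 ≤ ny ∧ ny < row) ∧ pvVget s.2.1 nx ny = false ∧ pvCell land nx ny ≠ 0 then
    (s.1 ++ [(nx, ny)], pvVset s.2.1 nx ny, PySem.Set.add s.2.2 ny)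
  else s

-- A's 'while que' loop; the fuel is a termination guard only (2*col*row+1 provably suffices: each
-- iteration pops one entry and every push marks a still-unvisited cell visited).
def pvBfs (land : List (List Int)) (col row : Int) :
    Nat → List (Int × Int) → Int → List (List Bool) → PySem.Set Int →
    Int × PySem.Set Int × List (List Bool)
  | _, [], count, visited, arr => (count, arr, visited)
  | 0, _ :: _, count, visited, arr => (count, arr, visited)
  | fuel + 1, (cx, cy) :: rest, count, visited, arr =>
    let r := pvDirs.foldl (pvPush land col row cx cy) (rest, visited, arr)
    pvBfs land col row fuel r.1 (count + 1) r.2.1 r.2.2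

-- A's dfs(x, y): mark the start visited, arr = {y}, que = [(x, y)], then run the while loop
def pvDfs (land : List (List Int)) (col row x y : Int) (visited : List (List Bool)) :
    Int × PySem.Set Int × List (List Bool) :=
  pvBfs land col row (2 * (col * row).toNat + 1) [(x, y)] 0 (pvVset visited x y)
    (PySem.Set.add PySem.Set.empty y)

def solution (land : List (List Int)) : Int :=
  let col : Int := land.length
  let row : Int := (PySem.List.pyGetD land 0 []).length
  let lpr0 : List Int := List.replicate row.toNat 0
  let visited0 : List (List Bool) := List.replicate col.toNat (List.replicate row.toNat false)
  let res := (PySem.List.pyRange 0 row 1).foldl (fun st y =>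
      (PySem.List.pyRange 0 col 1).foldl (fun st x =>
        if pvVget st.2 x y = false ∧ pvCell land x y ≠ 0 then
          let r := pvDfs land col row x y st.2
          ((r.2.1 : List Int).foldl
              (fun l a => PySem.List.pySetD l a (PySem.List.pyGetD l a 0 + r.1)) st.1,
           r.2.2)
        else st) st) (lpr0, visited0)
  (PySem.List.max? res.1 (fun v => v)).getD 0

-- ===== PORT B =====

-- the four neighbours (x+dx, y+dy) produced by B's frontier comprehension for one frontier cell
def pvNbrs (z : Int × Int) : List (Int × Int) :=
  [(z.1, z.2 + 1), (z.1, z.2 - 1), (z.1 + 1, z.2), (z.1 - 1, z.2)]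

-- B's oil-cell set comprehension
def pvOilset (land : List (List Int)) : PySem.Set (Int × Int) :=
  PySem.Set.ofList ((PySem.List.pyRange 0 land.length 1).flatMap (fun x =>
    ((PySem.List.pyRange 0 ((PySem.List.pyGetD land 0 []).length : Int) 1).filter
        (fun y => decide (pvCell land x y ≠ 0))).map (fun y => (x, y))))

-- B's 'while frontier' saturation loop; fuel is a termination guard only (len(oilset)+1 provably
-- suffices: every round with a nonempty new frontier strictly grows comp inside oilset).
def pvGrow (oilset : PySem.Set (Int × Int)) :
    Nat → PySem.Set (Int × Int) → PySem.Set (Int × Int) → PySem.Set (Int × Int)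
  | 0, _, comp => comp
  | fuel + 1, frontier, comp =>
    if frontier = [] then comp
    else
      let frontier' :=
        PySem.Set.diff (PySem.Set.inter (PySem.Set.ofList (frontier.flatMap pvNbrs)) oilset) comp
      pvGrow oilset fuel frontier' (PySem.Set.union comp frontier')

-- B's component of z: comp = frontier = {z}, then saturate
def pvCompFor (land : List (List Int)) (z : Int × Int) : PySem.Set (Int × Int) :=
  pvGrow (pvOilset land) ((pvOilset land).length + 1) [z] [z]

def solution_alt (land : List (List Int)) : Int :=
  let row : Int := (PySem.List.pyGetD land 0 []).length
  let oilset := pvOilset land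
  let res := (PySem.List.sorted2 oilset Prod.fst Prod.snd false).foldl (fun st z =>
      if PySem.Set.contains st.2 z then st
      else
        let comp := pvCompFor land z
        let cols : PySem.Set Int := PySem.Set.ofList (comp.map Prod.snd)
        (cols.foldl
            (fun l c => PySem.List.pySetD l c (PySem.List.pyGetD l c 0 + (comp.length : Int))) st.1,
         PySem.Set.union st.2 comp))
    (List.replicate row.toNat (0 : Int), PySem.Set.empty)
  (PySem.List.max? res.1 (fun v => v)).getD 0

-- ===== PRECONDITION & SPEC =====

-- Exactly where the Python A returns: it raises IndexError when the grid has no rows or some later row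
-- is shorter than the first row, and ValueError (max of an empty list) when the first row is empty.
def Pre_solution (land : List (List Int)) : Prop :=
  land ≠ [] ∧ 0 < (land.headD []).length ∧ ∀ r ∈ land, (land.headD []).length ≤ r.length
instance (land : List (List Int)) : Decidable (Pre_solution land) := by
  unfold Pre_solution; infer_instance

def pvWitness_solution : List (List Int) := [[1, 0], [1, 1]]

def Spec_solution (land : List (List Int)) (out : Int) : Prop := out = solution_alt land
instance (land : List (List Int)) (out : Int) : Decidable (Spec_solution land out) := by
  unfold Spec_solution; infer_instance

-- ===== CLAIM (what is proved, stated in full; the proofs are below) =====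
def Claim_equal_solution : Prop :=
  ∀ (land : List (List Int)), Dom_solution land → Pre_solution land → Spec_solution land (solution land)

-- ===== LEMMAS AND PROOFS =====

-- grid dimensions, in Nat
def pvColN (land : List (List Int)) : Nat := land.length
def pvRowN (land : List (List Int)) : Nat := (PySem.List.pyGetD land 0 []).length

def pvInGrid (land : List (List Int)) (w : Int × Int) : Prop :=
  0 ≤ w.1 ∧ w.1 < (pvColN land : Int) ∧ 0 ≤ w.2 ∧ w.2 < (pvRowN land : Int)

def pvOil (land : List (List Int)) (w : Int × Int) : Prop :=
  pvInGrid land w ∧ pvCell land w.1 w.2 ≠ 0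

def pvAdj (land : List (List Int)) (z w : Int × Int) : Prop :=
  pvOil land z ∧ pvOil land w ∧
    ((w.1 = z.1 ∧ (w.2 = z.2 + 1 ∨ w.2 = z.2 - 1)) ∨
     (w.2 = z.2 ∧ (w.1 = z.1 + 1 ∨ w.1 = z.1 - 1)))

def pvReach (land : List (List Int)) : Int × Int → Int × Int → Prop :=
  Relation.ReflTransGen (pvAdj land)

-- the visited matrix viewed abstractly
def pvVm (v : List (List Bool)) (w : Int × Int) : Prop := pvVget v w.1 w.2 = true

def pvShape (land : List (List Int)) (v : List (List Bool)) : Prop :=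
  v.length = pvColN land ∧ ∀ r ∈ v, r.length = pvRowN land

-- per-column total over an adj-closed visited set V: number of cells of V whose component touches column c
def pvCnt (land : List (List Int)) (V : Finset (Int × Int)) (c : Int) : Nat :=
  (V.filter (fun w => c ∈ (pvCompFor land w).map Prod.snd)).card

-- ---------- basic facts ----------

theorem pvAdj_symm {land : List (List Int)} {z w : Int × Int} (h : pvAdj land z w) :
    pvAdj land w z := by
  obtain ⟨hz, hw, hd⟩ := h
  refine ⟨hw, hz, ?_⟩
  rcases hd with ⟨h1, h2 | h2⟩ | ⟨h1, h2 | h2⟩ <;> [skip; skip; skip; skip] <;> omega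

theorem pvReach_symm {land : List (List Int)} {z w : Int × Int} (h : pvReach land z w) :
    pvReach land w z := by
  induction h with
  | refl => exact Relation.ReflTransGen.refl
  | tail _ hadj ih => exact Relation.ReflTransGen.head (pvAdj_symm hadj) ih

theorem pvReach_oil {land : List (List Int)} {z w : Int × Int} (h : pvReach land z w)
    (hz : pvOil land z) : pvOil land w := by
  induction h with
  | refl => exact hz
  | tail _ hadj _ => exact hadj.2.1

theorem mem_pvNbrs_adj {land : List (List Int)} {z u : Int × Int}
    (hz : pvOil land z) (hu : pvOil land u) (hm : u ∈ pvNbrs z) : pvAdj land z u := by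
  refine ⟨hz, hu, ?_⟩
  simp only [pvNbrs, List.mem_cons, List.not_mem_nil, or_false] at hm
  rcases hm with h | h | h | h <;> subst h
  · exact Or.inl ⟨rfl, Or.inl rfl⟩
  · exact Or.inl ⟨rfl, Or.inr rfl⟩
  · exact Or.inr ⟨rfl, Or.inl rfl⟩
  · exact Or.inr ⟨rfl, Or.inr rfl⟩

theorem pvAdj_mem_pvNbrs {land : List (List Int)} {z u : Int × Int} (h : pvAdj land z u) :
    u ∈ pvNbrs z := by
  obtain ⟨_, _, hd⟩ := h
  have hu : u = (u.1, u.2) := rfl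
  simp only [pvNbrs, List.mem_cons, List.not_mem_nil, or_false]
  rcases hd with ⟨h1, h2 | h2⟩ | ⟨h1, h2 | h2⟩
  · exact Or.inl (by rw [hu, h1, h2])
  · exact Or.inr (Or.inl (by rw [hu, h1, h2]))
  · exact Or.inr (Or.inr (Or.inl (by rw [hu, h1, h2])))
  · exact Or.inr (Or.inr (Or.inr (by rw [hu, h1, h2])))

theorem mem_pvOilset {land : List (List Int)} {w : Int × Int} :
    w ∈ pvOilset land ↔ pvOil land w := by
  unfold pvOilset pvOil pvInGrid pvColN pvRowN
  rw [PySem.Set.mem_ofList]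
  simp only [List.mem_flatMap, List.mem_map, List.mem_filter, PySem.List.mem_pyRange_one,
    decide_eq_true_eq]
  constructor
  · rintro ⟨x, ⟨hx0, hx1⟩, y, ⟨⟨⟨hy0, hy1⟩, hc⟩, rfl⟩⟩
    exact ⟨⟨hx0, hx1, hy0, hy1⟩, hc⟩
  · rintro ⟨⟨h1, h2, h3, h4⟩, hc⟩
    exact ⟨w.1, ⟨h1, h2⟩, w.2, ⟨⟨⟨h3, h4⟩, hc⟩, rfl⟩⟩

theorem length_pvOilset_le (land : List (List Int)) :
    (pvOilset land).length ≤ pvColN land * pvRowN land := by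
  refine le_trans (PySem.Set.length_ofList_le _) ?_
  rw [List.length_flatMap]
  refine le_trans (List.sum_le_card_nsmul _ (pvRowN land) ?_) ?_
  · intro n hn
    simp only [List.mem_map] at hn
    obtain ⟨x, _, rfl⟩ := hn
    calc _ ≤ (PySem.List.pyRange 0 ((PySem.List.pyGetD land 0 []).length : Int) 1).length := by
              rw [List.length_map]; exact List.length_filter_le _ _
      _ = pvRowN land := by
              rw [show ((PySem.List.pyGetD land 0 []).length : Int) = ((pvRowN land : Nat) : Int) from rfl,
                PySem.List.pyRange_zero_natCast, List.length_map, List.length_range]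
  · rw [List.length_map,
      show (PySem.List.pyRange 0 (land.length : Int) 1) = PySem.List.pyRange 0 ((pvColN land : Nat) : Int) 1 from rfl,
      PySem.List.pyRange_zero_natCast, List.length_map, List.length_range]
    simp [smul_eq_mul]

-- ---------- pvGrow correctness ----------

theorem closed_complete {land : List (List Int)} {z : Int × Int} {comp : List (Int × Int)}
    (hz : z ∈ comp)
    (hr : ∀ w ∈ comp, pvReach land z w)
    (hc : ∀ w ∈ comp, ∀ u, pvAdj land w u → u ∈ comp) :
    ∀ w, w ∈ comp ↔ pvReach land z w := by
  intro w
  constructor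
  · exact hr w
  · intro h
    induction h with
    | refl => exact hz
    | tail _ hadj ih => exact hc _ ih _ hadj

theorem pvGrow_spec {land : List (List Int)} {z : Int × Int} :
    ∀ (fuel : Nat) (frontier comp : PySem.Set (Int × Int)),
      comp.Nodup →
      (∀ w ∈ frontier, w ∈ comp) →
      (∀ w ∈ comp, pvOil land w ∧ pvReach land z w) →
      z ∈ comp →
      (∀ w ∈ comp, w ∉ frontier → ∀ u, pvAdj land w u → u ∈ comp) →
      ((pvOilset land).toFinset \ comp.toFinset).card < fuel →
      (pvGrow (pvOilset land) fuel frontier comp).Nodup ∧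
        ∀ w, w ∈ pvGrow (pvOilset land) fuel frontier comp ↔ pvReach land z w := by
  intro fuel
  induction fuel with
  | zero => intro _ _ _ _ _ _ _ hcard; omega
  | succ fuel ih =>
    intro frontier comp hnd hfc hor hzc hcl hcard
    by_cases hfe : frontier = []
    · subst hfe
      rw [show pvGrow (pvOilset land) (fuel + 1) [] comp = comp from by simp [pvGrow]]
      refine ⟨hnd, closed_complete hzc (fun w hw => (hor w hw).2) ?_⟩
      intro w hw u hadj
      exact hcl w hw (by simp) u hadj
    · rw [show pvGrow (pvOilset land) (fuel + 1) frontier comp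
          = pvGrow (pvOilset land) fuel
              (PySem.Set.diff (PySem.Set.inter (PySem.Set.ofList (frontier.flatMap pvNbrs)) (pvOilset land)) comp)
              (PySem.Set.union comp
                (PySem.Set.diff (PySem.Set.inter (PySem.Set.ofList (frontier.flatMap pvNbrs)) (pvOilset land)) comp))
          from by rw [pvGrow]; simp [hfe]]
      set frontier' := PySem.Set.diff (PySem.Set.inter (PySem.Set.ofList (frontier.flatMap pvNbrs)) (pvOilset land)) comp with hf'
      set comp' := PySem.Set.union comp frontier' with hc'
      have hmemf' : ∀ u, u ∈ frontier' ↔ ((∃ t ∈ frontier, u ∈ pvNbrs t) ∧ pvOil land u ∧ u ∉ comp) := by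
        intro u
        rw [hf', PySem.Set.mem_diff, PySem.Set.mem_inter, PySem.Set.mem_ofList, List.mem_flatMap,
          mem_pvOilset]
        tauto
      have hmemc' : ∀ u, u ∈ comp' ↔ (u ∈ comp ∨ u ∈ frontier') := fun u => PySem.Set.mem_union _ _ u
      have hsub : ∀ u ∈ comp, u ∈ comp' := fun u hu => (hmemc' u).2 (Or.inl hu)
      have horf' : ∀ u ∈ frontier', pvOil land u ∧ pvReach land z u := by
        intro u hu
        obtain ⟨⟨t, ht, htn⟩, hou, _⟩ := (hmemf' u).1 hu
        have hot := (hor t (hfc t ht)).1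
        exact ⟨hou, Relation.ReflTransGen.tail (hor t (hfc t ht)).2 (mem_pvNbrs_adj hot hou htn)⟩
      have hor' : ∀ w ∈ comp', pvOil land w ∧ pvReach land z w := by
        intro w hw
        rcases (hmemc' w).1 hw with h | h
        · exact hor w h
        · exact horf' w h
      have hcl' : ∀ w ∈ comp', w ∉ frontier' → ∀ u, pvAdj land w u → u ∈ comp' := by
        intro w hw hwf u hadj
        rcases (hmemc' w).1 hw with h | h
        · by_cases hwfr : w ∈ frontier
          · have hun : u ∈ pvNbrs w := pvAdj_mem_pvNbrs hadj
            by_cases huc : u ∈ comp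
            · exact hsub u huc
            · refine (hmemc' u).2 (Or.inr ((hmemf' u).2 ⟨⟨w, hwfr, hun⟩, hadj.2.1, huc⟩))
          · exact hsub u (hcl w h hwfr u hadj)
        · exact absurd h hwf
      by_cases hfe' : frontier' = []
      · have hcomp'_eq : comp' = comp := by rw [hc', hfe']; rfl
        rw [show pvGrow (pvOilset land) fuel frontier' comp' = comp' from by
          rw [hfe']; cases fuel <;> simp [pvGrow]]
        rw [hcomp'_eq]
        refine ⟨hnd, closed_complete hzc (fun w hw => (hor w hw).2) ?_⟩
        intro w hw u hadj
        have := hcl' w (hsub w hw)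
        rw [hfe'] at this
        have := this (by simp) u hadj
        rw [hcomp'_eq] at this
        exact this
      · obtain ⟨u0, hu0⟩ := List.exists_mem_of_ne_nil _ hfe'
        have hnd' : comp'.Nodup := PySem.Set.nodup_union _ _ hnd
        have hcard' : ((pvOilset land).toFinset \ comp'.toFinset).card
            < ((pvOilset land).toFinset \ comp.toFinset).card := by
          apply Finset.card_lt_card
          constructor
          · intro a ha
            simp only [Finset.mem_sdiff, List.mem_toFinset] at ha ⊢
            exact ⟨ha.1, fun hac => ha.2 (hsub a hac)⟩
          · intro hsubs
            have hu0o : pvOil land u0 := ((hmemf' u0).1 hu0).2.1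
            have hu0nc : u0 ∉ comp := ((hmemf' u0).1 hu0).2.2
            have : u0 ∈ (pvOilset land).toFinset \ comp.toFinset := by
              simp only [Finset.mem_sdiff, List.mem_toFinset]
              exact ⟨mem_pvOilset.2 hu0o, hu0nc⟩
            have := hsubs this
            simp only [Finset.mem_sdiff, List.mem_toFinset] at this
            exact this.2 ((hmemc' u0).2 (Or.inr hu0))
        exact ih frontier' comp' hnd' (fun w hw => (hmemc' w).2 (Or.inr hw)) hor'
          (hsub z hzc) hcl' (by omega)

theorem pvCompFor_spec {land : List (List Int)} {z : Int × Int} (hz : pvOil land z) :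
    (pvCompFor land z).Nodup ∧ ∀ w, w ∈ pvCompFor land z ↔ pvReach land z w := by
  refine pvGrow_spec ((pvOilset land).length + 1) [z] [z] (by simp) (fun w hw => hw)
    ?_ (by simp) (fun w hw hnw => absurd hw hnw) ?_
  · intro w hw
    simp only [List.mem_singleton] at hw
    subst hw
    exact ⟨hz, Relation.ReflTransGen.refl⟩
  · calc ((pvOilset land).toFinset \ [z].toFinset).card
        ≤ (pvOilset land).toFinset.card := Finset.card_le_card (Finset.sdiff_subset)
      _ ≤ (pvOilset land).length := List.toFinset_card_le _
      _ < (pvOilset land).length + 1 := Nat.lt_succ_self _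

theorem pvCompFor_nodup {land : List (List Int)} {z : Int × Int} (hz : pvOil land z) :
    (pvCompFor land z).Nodup := (pvCompFor_spec hz).1

theorem mem_pvCompFor {land : List (List Int)} {z : Int × Int} (hz : pvOil land z) :
    ∀ w, w ∈ pvCompFor land z ↔ pvReach land z w := (pvCompFor_spec hz).2

theorem pvCompFor_congr {land : List (List Int)} {z w : Int × Int} (hz : pvOil land z)
    (hw : w ∈ pvCompFor land z) : ∀ u, u ∈ pvCompFor land w ↔ u ∈ pvCompFor land z := by
  intro u
  have hrzw : pvReach land z w := (mem_pvCompFor hz w).1 hw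
  have how : pvOil land w := pvReach_oil hrzw hz
  rw [mem_pvCompFor how u, mem_pvCompFor hz u]
  constructor
  · intro h; exact hrzw.trans h
  · intro h; exact (pvReach_symm hrzw).trans h

-- every oil cell is a member of its own component
theorem self_mem_pvCompFor {land : List (List Int)} {z : Int × Int} (hz : pvOil land z) :
    z ∈ pvCompFor land z :=
  (mem_pvCompFor hz z).2 Relation.ReflTransGen.refl

-- the component is a set of oil cells
theorem oil_of_mem_pvCompFor {land : List (List Int)} {z w : Int × Int} (hz : pvOil land z)
    (hw : w ∈ pvCompFor land z) : pvOil land w :=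
  pvReach_oil ((mem_pvCompFor hz w).1 hw) hz

-- ---------- visited matrix lemmas ----------

-- a getD form of pvVget (no side conditions)
theorem pvVget_eq (v : List (List Bool)) {x : Int} (y : Int) (hx : 0 ≤ x) (hy : 0 ≤ y) :
    pvVget v x y = (v.getD x.toNat []).getD y.toNat false := by
  unfold pvVget
  rw [PySem.List.pyGetD_of_nonneg _ _ hx, PySem.List.pyGetD_of_nonneg _ _ hy]

theorem pvShape_vset {land : List (List Int)} {v : List (List Bool)} {x y : Int}
    (hs : pvShape land v) (hx : 0 ≤ x) (hxc : x < (pvColN land : Int)) :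
    pvShape land (pvVset v x y) := by
  obtain ⟨hl, hr⟩ := hs
  unfold pvVset
  rw [PySem.List.pySetD_of_nonneg _ _ hx]
  constructor
  · rw [List.length_set]; exact hl
  · intro r hrm
    rcases List.mem_or_eq_of_mem_set hrm with h | h
    · exact hr r h
    · subst h
      rw [PySem.List.length_pySetD, PySem.List.pyGetD_of_nonneg _ _ hx,
        List.getD_eq_getElem _ _ (by omega)]
      exact hr _ (List.getElem_mem _)

theorem pvVm_vset {land : List (List Int)} {v : List (List Bool)} {x y : Int} {w : Int × Int}
    (hs : pvShape land v) (hg : pvInGrid land (x, y)) (hw : pvInGrid land w) :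
    (pvVm (pvVset v x y) w ↔ (pvVm v w ∨ w = (x, y))) := by
  obtain ⟨hl, hr⟩ := hs
  obtain ⟨hg1, hg2, hg3, hg4⟩ := hg
  obtain ⟨hw1, hw2, hw3, hw4⟩ := hw
  simp only at hg1 hg2 hg3 hg4
  have hxl : x.toNat < v.length := by omega
  have hwl : w.1.toNat < v.length := by omega
  have hrowx : (v.getD x.toNat []).length = pvRowN land := by
    rw [List.getD_eq_getElem _ _ hxl]; exact hr _ (List.getElem_mem _)
  have hroww : (v.getD w.1.toNat []).length = pvRowN land := by
    rw [List.getD_eq_getElem _ _ hwl]; exact hr _ (List.getElem_mem _)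
  have hpg : PySem.List.pyGetD v x [] = v.getD x.toNat [] := PySem.List.pyGetD_of_nonneg _ _ hg1
  unfold pvVm pvVset
  rw [pvVget_eq _ _ hw1 hw3, pvVget_eq _ _ hw1 hw3,
    PySem.List.pySetD_of_nonneg _ _ hg1, PySem.List.pySetD_of_nonneg _ _ hg3, hpg]
  have h1 : (v.set x.toNat ((v.getD x.toNat []).set y.toNat true)).getD w.1.toNat []
      = if x.toNat = w.1.toNat then (v.getD x.toNat []).set y.toNat true
        else v.getD w.1.toNat [] := by
    rw [List.getD_eq_getElem _ _ (by rw [List.length_set]; exact hwl), List.getElem_set]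
    by_cases h : x.toNat = w.1.toNat
    · simp [h]
    · simp only [if_neg h]
      rw [List.getD_eq_getElem _ _ hwl]
  rw [h1]
  by_cases hx : x.toNat = w.1.toNat
  · rw [if_pos hx]
    have h2 : ((v.getD x.toNat []).set y.toNat true).getD w.2.toNat false
        = if y.toNat = w.2.toNat then true else (v.getD x.toNat []).getD w.2.toNat false := by
      rw [List.getD_eq_getElem _ _ (by rw [List.length_set]; omega), List.getElem_set]
      by_cases h : y.toNat = w.2.toNat
      · simp [h]
      · simp only [if_neg h]
        rw [List.getD_eq_getElem _ _ (by omega : w.2.toNat < (v.getD x.toNat []).length)]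
    rw [h2]
    have hx' : w.1 = x := by omega
    by_cases hy : y.toNat = w.2.toNat
    · have hw' : w = (x, y) := Prod.ext hx' (by omega)
      simp [hy, hw']
    · have hw' : ¬ w = (x, y) := by
        intro h; rw [h] at hy; exact hy rfl
      rw [if_neg hy]
      rw [show v.getD w.1.toNat [] = v.getD x.toNat [] from by rw [hx]] 
      simp [hw']
  · rw [if_neg hx]
    have hw' : ¬ w = (x, y) := by
      intro h; rw [h] at hx; exact hx rfl
    simp [hw']

theorem pvVm_replicate {land : List (List Int)} {w : Int × Int} (hw : pvInGrid land w) :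
    ¬ pvVm (List.replicate (pvColN land) (List.replicate (pvRowN land) false)) w := by
  obtain ⟨hw1, hw2, hw3, hw4⟩ := hw
  unfold pvVm
  rw [pvVget_eq _ _ hw1 hw3,
    show (List.replicate (pvColN land) (List.replicate (pvRowN land) false)).getD w.1.toNat []
        = List.replicate (pvRowN land) false from by
      rw [List.getD_eq_getElem _ _ (by rw [List.length_replicate]; omega)]
      exact List.getElem_replicate _,
    List.getD_eq_getElem _ _ (by rw [List.length_replicate]; omega),
    List.getElem_replicate]
  simp

theorem pvShape_replicate (land : List (List Int)) :
    pvShape land (List.replicate (pvColN land) (List.replicate (pvRowN land) false)) := by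
  constructor
  · simp
  · intro r hr
    simp only [List.mem_replicate] at hr
    simp [hr.2]

-- ---------- per-column list update ----------

theorem bump_fold {q : Int} :
    ∀ (S : List Int) (lpr : List Int), S.Nodup →
      (∀ c ∈ S, 0 ≤ c ∧ c < (lpr.length : Int)) →
      (S.foldl (fun l a => PySem.List.pySetD l a (PySem.List.pyGetD l a 0 + q)) lpr).length
          = lpr.length ∧
      ∀ j : Nat, (hj : j < lpr.length) →
        (S.foldl (fun l a => PySem.List.pySetD l a (PySem.List.pyGetD l a 0 + q)) lpr).getD j 0
          = lpr.getD j 0 + (if (j : Int) ∈ S then q else 0) := by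
  intro S
  induction S with
  | nil => intro lpr _ _; exact ⟨rfl, fun j hj => by simp⟩
  | cons a S ih =>
    intro lpr hnd hrange
    have ha := hrange a (List.mem_cons_self)
    have hset : PySem.List.pySetD lpr a (PySem.List.pyGetD lpr a 0 + q)
        = lpr.set a.toNat (lpr.getD a.toNat 0 + q) := by
      rw [PySem.List.pySetD_of_nonneg _ _ ha.1, PySem.List.pyGetD_of_nonneg _ _ ha.1]
    have hlen' : (lpr.set a.toNat (lpr.getD a.toNat 0 + q)).length = lpr.length :=
      List.length_set ..
    obtain ⟨ihlen, ihval⟩ := ih (lpr.set a.toNat (lpr.getD a.toNat 0 + q))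
      (List.nodup_cons.1 hnd).2
      (fun c hc => by rw [hlen']; exact hrange c (List.mem_cons_of_mem _ hc))
    constructor
    · simp only [List.foldl_cons, hset, ihlen, hlen']
    · intro j hj
      have hj' : j < (lpr.set a.toNat (lpr.getD a.toNat 0 + q)).length := by rw [hlen']; exact hj
      simp only [List.foldl_cons, hset]
      rw [ihval j hj']
      rw [List.getD_eq_getElem _ _ hj', List.getElem_set, List.getD_eq_getElem _ _ hj]
      by_cases hja : (j : Int) = a
      · have hjn : a.toNat = j := by omega
        have hnotin : (j : Int) ∉ S := by rw [hja]; exact (List.nodup_cons.1 hnd).1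
        have hgd : lpr.getD a.toNat 0 = lpr[j] := by
          rw [hjn]; exact List.getD_eq_getElem _ _ hj
        rw [if_pos hjn, if_neg hnotin, if_pos (List.mem_cons.2 (Or.inl hja)), hgd, add_zero]
      · have hjn : ¬ a.toNat = j := by omega
        rw [if_neg hjn]
        simp only [List.mem_cons, hja, false_or]

-- ---------- counting ----------

theorem pvCnt_union {land : List (List Int)} {V : Finset (Int × Int)} {z : Int × Int}
    (hz : pvOil land z)
    (hdisj : ∀ w ∈ (pvCompFor land z).toFinset, w ∉ V) :
    ∀ c, pvCnt land (V ∪ (pvCompFor land z).toFinset) c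
        = pvCnt land V c +
          (if c ∈ (pvCompFor land z).map Prod.snd then (pvCompFor land z).length else 0) := by
  intro c
  unfold pvCnt
  rw [Finset.filter_union, Finset.card_union_of_disjoint (by
    rw [Finset.disjoint_left]
    intro a haV haC
    exact hdisj a (Finset.mem_of_mem_filter a haC) (Finset.mem_of_mem_filter a haV))]
  congr 1
  have hsame : ∀ w ∈ (pvCompFor land z).toFinset,
      (c ∈ (pvCompFor land w).map Prod.snd ↔ c ∈ (pvCompFor land z).map Prod.snd) := by
    intro w hwm
    rw [List.mem_toFinset] at hwm
    constructor <;> intro h <;> simp only [List.mem_map] at h ⊢ <;>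
      obtain ⟨u, hu, rfl⟩ := h
    · exact ⟨u, (pvCompFor_congr hz hwm u).1 hu, rfl⟩
    · exact ⟨u, (pvCompFor_congr hz hwm u).2 hu, rfl⟩
  by_cases hcz : c ∈ (pvCompFor land z).map Prod.snd
  · rw [if_pos hcz, Finset.filter_true_of_mem (fun w hw => (hsame w hw).2 hcz),
      List.toFinset_card_of_nodup (pvCompFor_nodup hz)]
  · rw [if_neg hcz, Finset.filter_false_of_mem (fun w hw hc => hcz ((hsame w hw).1 hc)),
      Finset.card_empty]

-- ---------- BFS ----------

theorem pvBfs_nil (land : List (List Int)) (col row : Int) (fuel : Nat) (count : Int)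
    (visited : List (List Bool)) (arr : PySem.Set Int) :
    pvBfs land col row fuel [] count visited arr = (count, arr, visited) := by
  cases fuel <;> rfl

theorem pvBfs_cons (land : List (List Int)) (col row : Int) (fuel : Nat) (cx cy : Int)
    (rest : List (Int × Int)) (count : Int) (visited : List (List Bool)) (arr : PySem.Set Int) :
    pvBfs land col row (fuel + 1) ((cx, cy) :: rest) count visited arr =
      pvBfs land col row fuel
        (pvDirs.foldl (pvPush land col row cx cy) (rest, visited, arr)).1 (count + 1)
        (pvDirs.foldl (pvPush land col row cx cy) (rest, visited, arr)).2.1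
        (pvDirs.foldl (pvPush land col row cx cy) (rest, visited, arr)).2.2 := rfl

theorem mem_pvDirs_adj {land : List (List Int)} {c1 c2 : Int} (hc : pvOil land (c1, c2))
    {u : Int × Int} (hu : pvOil land u) {d : Int × Int} (hd : d ∈ pvDirs)
    (he : u = (c1 + d.1, c2 + d.2)) : pvAdj land (c1, c2) u := by
  subst he
  refine ⟨hc, hu, ?_⟩
  simp only [pvDirs, List.mem_cons, List.not_mem_nil, or_false] at hd
  rcases hd with rfl | rfl | rfl | rfl <;> simp <;> omega

theorem adj_mem_pvDirs {land : List (List Int)} {c1 c2 : Int} {u : Int × Int}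
    (h : pvAdj land (c1, c2) u) : ∃ d ∈ pvDirs, u = (c1 + d.1, c2 + d.2) := by
  have hm := pvAdj_mem_pvNbrs h
  simp only [pvNbrs, List.mem_cons, List.not_mem_nil, or_false] at hm
  rcases hm with h' | h' | h' | h'
  · exact ⟨(0, 1), by simp [pvDirs], by rw [h', Prod.ext_iff]; refine ⟨by omega, by omega⟩⟩
  · exact ⟨(0, -1), by simp [pvDirs], by rw [h', Prod.ext_iff]; refine ⟨by omega, by omega⟩⟩
  · exact ⟨(1, 0), by simp [pvDirs], by rw [h', Prod.ext_iff]; refine ⟨by omega, by omega⟩⟩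
  · exact ⟨(-1, 0), by simp [pvDirs], by rw [h', Prod.ext_iff]; refine ⟨by omega, by omega⟩⟩

-- the push condition, abstractly
theorem pvPush_cond {land : List (List Int)} {v : List (List Bool)} {u : Int × Int} :
    ((0 ≤ u.1 ∧ u.1 < ((pvColN land : Nat) : Int) ∧ 0 ≤ u.2 ∧ u.2 < ((pvRowN land : Nat) : Int))
        ∧ pvVget v u.1 u.2 = false ∧ pvCell land u.1 u.2 ≠ 0)
      ↔ (pvOil land u ∧ ¬ pvVm v u) := by
  unfold pvOil pvInGrid pvVm
  constructor
  · rintro ⟨hb, hv, hcell⟩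
    exact ⟨⟨hb, hcell⟩, by simp [hv]⟩
  · rintro ⟨⟨hb, hcell⟩, hv⟩
    exact ⟨hb, by simpa using hv, hcell⟩

theorem pvPush_fold {land : List (List Int)} {c1 c2 : Int} :
    ∀ (ds : List (Int × Int)) (q : List (Int × Int)) (v : List (List Bool)) (a : PySem.Set Int),
      pvShape land v → a.Nodup →
      ∃ P : List (Int × Int),
        (ds.foldl (pvPush land (pvColN land) (pvRowN land) c1 c2) (q, v, a)).1 = q ++ P ∧
        P.Nodup ∧
        (∀ u ∈ P, (∃ d ∈ ds, u = (c1 + d.1, c2 + d.2)) ∧ pvOil land u ∧ ¬ pvVm v u) ∧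
        (∀ d ∈ ds, pvOil land (c1 + d.1, c2 + d.2) →
          (pvVm v (c1 + d.1, c2 + d.2) ∨ (c1 + d.1, c2 + d.2) ∈ P)) ∧
        pvShape land (ds.foldl (pvPush land (pvColN land) (pvRowN land) c1 c2) (q, v, a)).2.1 ∧
        (∀ w, pvInGrid land w →
          (pvVm (ds.foldl (pvPush land (pvColN land) (pvRowN land) c1 c2) (q, v, a)).2.1 w ↔
            (pvVm v w ∨ w ∈ P))) ∧
        (ds.foldl (pvPush land (pvColN land) (pvRowN land) c1 c2) (q, v, a)).2.2.Nodup ∧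
        (∀ k, k ∈ (ds.foldl (pvPush land (pvColN land) (pvRowN land) c1 c2) (q, v, a)).2.2 ↔
          (k ∈ a ∨ ∃ u ∈ P, u.2 = k)) := by
  intro ds
  induction ds with
  | nil =>
    intro q v a hs ha
    exact ⟨[], by simp, by simp, by simp, by simp, hs, fun w _ => by simp, ha, fun k => by simp⟩
  | cons d ds ih =>
    intro q v a hs ha
    simp only [List.foldl_cons]
    set u : Int × Int := (c1 + d.1, c2 + d.2) with hu
    have hstep : pvPush land (pvColN land) (pvRowN land) c1 c2 (q, v, a) d =
        if (0 ≤ u.1 ∧ u.1 < ((pvColN land : Nat) : Int) ∧ 0 ≤ u.2 ∧ u.2 < ((pvRowN land : Nat) : Int))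
            ∧ pvVget v u.1 u.2 = false ∧ pvCell land u.1 u.2 ≠ 0 then
          (q ++ [u], pvVset v u.1 u.2, PySem.Set.add a u.2)
        else (q, v, a) := rfl
    by_cases hcond : pvOil land u ∧ ¬ pvVm v u
    · have hc' := pvPush_cond (land := land) (v := v) (u := u) |>.2 hcond
      rw [hstep, if_pos hc']
      have hg : pvInGrid land u := hcond.1.1
      have hs' : pvShape land (pvVset v u.1 u.2) := pvShape_vset hs hg.1 hg.2.1
      have hvm' : ∀ w, pvInGrid land w →
          (pvVm (pvVset v u.1 u.2) w ↔ (pvVm v w ∨ w = u)) := by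
        intro w hw
        have := pvVm_vset (x := u.1) (y := u.2) hs hg hw
        simpa using this
      obtain ⟨P, hP1, hP2, hP3, hP4, hP5, hP6, hP7, hP8⟩ :=
        ih (q ++ [u]) (pvVset v u.1 u.2) (PySem.Set.add a u.2) hs' (PySem.Set.nodup_add _ _ ha)
      refine ⟨u :: P, ?_, ?_, ?_, ?_, hP5, ?_, hP7, ?_⟩
      · rw [hP1, List.append_assoc]; rfl
      · refine List.nodup_cons.2 ⟨?_, hP2⟩
        intro humem
        have := (hP3 u humem).2.2
        exact this ((hvm' u hg).2 (Or.inr rfl))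
      · intro w hw
        rcases List.mem_cons.1 hw with rfl | hw'
        · exact ⟨⟨d, List.mem_cons_self, rfl⟩, hcond.1, hcond.2⟩
        · obtain ⟨⟨d', hd', he⟩, ho, hnv⟩ := hP3 w hw'
          refine ⟨⟨d', List.mem_cons_of_mem _ hd', he⟩, ho, ?_⟩
          intro hvw
          exact hnv ((hvm' w ho.1).2 (Or.inl hvw))
      · intro d' hd' ho
        rcases List.mem_cons.1 hd' with rfl | hd''
        · exact Or.inr (List.mem_cons_self)
        · rcases hP4 d' hd'' ho with hvm | hmem
          · rcases (hvm' _ ho.1).1 hvm with h | h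
            · exact Or.inl h
            · exact Or.inr (List.mem_cons.2 (Or.inl h))
          · exact Or.inr (List.mem_cons_of_mem _ hmem)
      · intro w hw
        rw [hP6 w hw, hvm' w hw, List.mem_cons]
        tauto
      · intro k
        rw [hP8 k, PySem.Set.mem_add]
        constructor
        · rintro (⟨h | rfl⟩ | ⟨w, hw, he⟩)
          · exact Or.inl h
          · exact Or.inr ⟨u, List.mem_cons_self, rfl⟩
          · exact Or.inr ⟨w, List.mem_cons_of_mem _ hw, he⟩
        · rintro (h | ⟨w, hw, he⟩)
          · exact Or.inl (Or.inl h)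
          · rcases List.mem_cons.1 hw with rfl | hw'
            · exact Or.inl (Or.inr he.symm)
            · exact Or.inr ⟨w, hw', he⟩
    · have hc' : ¬ (((0 ≤ u.1 ∧ u.1 < ((pvColN land : Nat) : Int) ∧ 0 ≤ u.2 ∧ u.2 < ((pvRowN land : Nat) : Int))
            ∧ pvVget v u.1 u.2 = false ∧ pvCell land u.1 u.2 ≠ 0)) := by
        intro hcc
        exact hcond (pvPush_cond.1 hcc)
      rw [hstep, if_neg hc']
      obtain ⟨P, hP1, hP2, hP3, hP4, hP5, hP6, hP7, hP8⟩ := ih q v a hs ha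
      refine ⟨P, hP1, hP2, ?_, ?_, hP5, hP6, hP7, hP8⟩
      · intro w hw
        obtain ⟨⟨d', hd', he⟩, ho, hnv⟩ := hP3 w hw
        exact ⟨⟨d', List.mem_cons_of_mem _ hd', he⟩, ho, hnv⟩
      · intro d' hd' ho
        rcases List.mem_cons.1 hd' with rfl | hd''
        · left
          by_contra hnv
          exact hcond ⟨ho, hnv⟩
        · exact hP4 d' hd'' ho


-- when the queue is empty, the popped cells are exactly the component
theorem pvBfs_done {land : List (List Int)} {z : Int × Int} {V₀ : Finset (Int × Int)}
    (hz : pvOil land z)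
    (hV₀cl : ∀ a ∈ V₀, ∀ u, pvAdj land a u → u ∈ V₀)
    (done : List (Int × Int))
    (h3 : ∀ w ∈ done, pvOil land w ∧ pvReach land z w ∧ w ∉ V₀)
    (h5 : ∀ w ∈ done, ∀ u, pvAdj land w u → (u ∈ V₀ ∨ u ∈ done))
    (h7 : z ∈ done) :
    ∀ w, w ∈ done ↔ w ∈ pvCompFor land z := by
  intro w
  rw [mem_pvCompFor hz w]
  constructor
  · exact fun h => (h3 w h).2.1
  · intro hr
    induction hr with
    | refl => exact h7
    | @tail b u hzb hadj ih =>
      rcases h5 b ih u hadj with hu | hu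
      · exfalso
        exact (h3 b ih).2.2 (hV₀cl u hu b (pvAdj_symm hadj))
      · exact hu

theorem pvBfs_spec {land : List (List Int)} {z : Int × Int} {V₀ : Finset (Int × Int)}
    (hz : pvOil land z)
    (hV₀cl : ∀ a ∈ V₀, ∀ u, pvAdj land a u → u ∈ V₀) :
    ∀ (fuel : Nat) (que done : List (Int × Int)) (count : Int) (visited : List (List Bool))
      (arr : PySem.Set Int),
      pvShape land visited →
      (done ++ que).Nodup →
      (∀ w ∈ done ++ que, pvOil land w ∧ pvReach land z w ∧ w ∉ V₀) →
      (∀ w, pvInGrid land w → (pvVm visited w ↔ (w ∈ V₀ ∨ w ∈ done ++ que))) →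
      (∀ w ∈ done, ∀ u, pvAdj land w u → (u ∈ V₀ ∨ u ∈ done ++ que)) →
      z ∈ done ++ que →
      que.length + 2 * (((pvOilset land).toFinset \ (V₀ ∪ (done ++ que).toFinset)).card) ≤ fuel →
      arr.Nodup →
      (pvBfs land (pvColN land) (pvRowN land) fuel que count visited arr).1
          = count + (((pvCompFor land z).toFinset \ done.toFinset).card : Int) ∧
      (pvBfs land (pvColN land) (pvRowN land) fuel que count visited arr).2.1.Nodup ∧
      (∀ k, k ∈ (pvBfs land (pvColN land) (pvRowN land) fuel que count visited arr).2.1 ↔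
          (k ∈ arr ∨ ∃ w ∈ pvCompFor land z, w ∉ done ++ que ∧ w.2 = k)) ∧
      pvShape land (pvBfs land (pvColN land) (pvRowN land) fuel que count visited arr).2.2 ∧
      (∀ w, pvInGrid land w →
        (pvVm (pvBfs land (pvColN land) (pvRowN land) fuel que count visited arr).2.2 w ↔
          (w ∈ V₀ ∨ w ∈ pvCompFor land z))) := by
  intro fuel
  induction fuel with
  | zero =>
    intro que done count visited arr hsh hnd h3 h4 h5 h7 h9 han
    have hq : que = [] := by
      cases que with
      | nil => rfl
      | cons c r => simp at h9
    subst hq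
    rw [pvBfs_nil]
    have hdeq := pvBfs_done hz hV₀cl done (fun w hw => h3 w (by simpa using hw))
      (fun w hw u hu => by simpa using h5 w hw u hu) (by simpa using h7)
    refine ⟨?_, han, ?_, hsh, ?_⟩
    · have : (pvCompFor land z).toFinset \ done.toFinset = ∅ := by
        ext w; simp only [Finset.mem_sdiff, List.mem_toFinset, Finset.notMem_empty, iff_false]
        rintro ⟨h1, h2⟩; exact h2 ((hdeq w).2 h1)
      rw [this]; simp
    · intro k
      constructor
      · exact fun h => Or.inl h
      · rintro (h | ⟨w, hw, hnw, _⟩)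
        · exact h
        · exact absurd (by simpa using (hdeq w).2 hw) hnw
    · intro w hw
      rw [h4 w hw]
      simp only [List.append_nil]
      constructor
      · rintro (h | h)
        · exact Or.inl h
        · exact Or.inr ((hdeq w).1 h)
      · rintro (h | h)
        · exact Or.inl h
        · exact Or.inr ((hdeq w).2 h)
  | succ fuel ih =>
    intro que done count visited arr hsh hnd h3 h4 h5 h7 h9 han
    cases que with
    | nil =>
      -- same terminal argument as the zero case
      rw [pvBfs_nil]
      have hdeq := pvBfs_done hz hV₀cl done (fun w hw => h3 w (by simpa using hw))
        (fun w hw u hu => by simpa using h5 w hw u hu) (by simpa using h7)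
      refine ⟨?_, han, ?_, hsh, ?_⟩
      · have : (pvCompFor land z).toFinset \ done.toFinset = ∅ := by
          ext w; simp only [Finset.mem_sdiff, List.mem_toFinset, Finset.notMem_empty, iff_false]
          rintro ⟨h1, h2⟩; exact h2 ((hdeq w).2 h1)
        rw [this]; simp
      · intro k
        constructor
        · exact fun h => Or.inl h
        · rintro (h | ⟨w, hw, hnw, _⟩)
          · exact h
          · exact absurd (by simpa using (hdeq w).2 hw) hnw
      · intro w hw
        rw [h4 w hw]
        simp only [List.append_nil]
        constructor
        · rintro (h | h)
          · exact Or.inl h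
          · exact Or.inr ((hdeq w).1 h)
        · rintro (h | h)
          · exact Or.inl h
          · exact Or.inr ((hdeq w).2 h)
    | cons c rest =>
      obtain ⟨cx, cy⟩ := c
      have hcm : (cx, cy) ∈ done ++ (cx, cy) :: rest := by simp
      obtain ⟨hco, hcr, hcnv⟩ := h3 _ hcm
      rw [pvBfs_cons]
      obtain ⟨P, hP1, hP2, hP3, hP4, hP5, hP6, hP7, hP8⟩ :=
        pvPush_fold (land := land) (c1 := cx) (c2 := cy) pvDirs rest visited arr hsh han
      rw [hP1]
      have hPadj : ∀ u ∈ P, pvAdj land (cx, cy) u := by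
        intro u hu
        obtain ⟨⟨d, hd, he⟩, ho, _⟩ := hP3 u hu
        exact mem_pvDirs_adj hco ho hd he
      have hPreach : ∀ u ∈ P, pvReach land z u := fun u hu => hcr.tail (hPadj u hu)
      have hPnot : ∀ u ∈ P, u ∉ V₀ ∧ u ∉ done ++ (cx, cy) :: rest := by
        intro u hu
        obtain ⟨_, ho, hnv⟩ := hP3 u hu
        have := h4 u ho.1
        constructor
        · intro hin; exact hnv (this.2 (Or.inl hin))
        · intro hin; exact hnv (this.2 (Or.inr hin))
      have hdq_eq : (done ++ [(cx, cy)]) ++ (rest ++ P) = (done ++ (cx, cy) :: rest) ++ P := by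
        simp
      have hnd' : ((done ++ [(cx, cy)]) ++ (rest ++ P)).Nodup := by
        rw [hdq_eq]
        rw [List.nodup_append]
        exact ⟨hnd, hP2, fun a ha b hb heq => (hPnot b hb).2 (heq ▸ ha)⟩
      have h3' : ∀ w ∈ (done ++ [(cx, cy)]) ++ (rest ++ P),
          pvOil land w ∧ pvReach land z w ∧ w ∉ V₀ := by
        intro w hw
        rw [hdq_eq, List.mem_append] at hw
        rcases hw with hw | hw
        · exact h3 w hw
        · exact ⟨(hP3 w hw).2.1, hPreach w hw, (hPnot w hw).1⟩
      have h4' : ∀ w, pvInGrid land w →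
          (pvVm (pvDirs.foldl (pvPush land (pvColN land) (pvRowN land) cx cy)
              (rest, visited, arr)).2.1 w ↔
            (w ∈ V₀ ∨ w ∈ (done ++ [(cx, cy)]) ++ (rest ++ P))) := by
        intro w hw
        rw [hP6 w hw, h4 w hw, hdq_eq]
        simp only [List.mem_append]
        tauto
      have h5' : ∀ w ∈ done ++ [(cx, cy)], ∀ u, pvAdj land w u →
          (u ∈ V₀ ∨ u ∈ (done ++ [(cx, cy)]) ++ (rest ++ P)) := by
        intro w hw u hadj
        rw [hdq_eq, List.mem_append]
        rcases List.mem_append.1 hw with hw | hw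
        · rcases h5 w hw u hadj with h | h
          · exact Or.inl h
          · exact Or.inr (Or.inl h)
        · have hwc : w = (cx, cy) := by simpa using hw
          subst hwc
          obtain ⟨d, hd, he⟩ := adj_mem_pvDirs hadj
          have hou : pvOil land u := hadj.2.1
          rcases hP4 d hd (by rw [← he]; exact hou) with hvm | hmem
          · rw [← he] at hvm
            rcases (h4 u hou.1).1 hvm with h | h
            · exact Or.inl h
            · exact Or.inr (Or.inl h)
          · rw [← he] at hmem
            exact Or.inr (Or.inr hmem)
      have h7' : z ∈ (done ++ [(cx, cy)]) ++ (rest ++ P) := by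
        rw [hdq_eq, List.mem_append]; exact Or.inl h7
      have h9' : (rest ++ P).length +
          2 * (((pvOilset land).toFinset \ (V₀ ∪ ((done ++ [(cx, cy)]) ++ (rest ++ P)).toFinset)).card)
            ≤ fuel := by
        have hUeq : (pvOilset land).toFinset \ (V₀ ∪ ((done ++ [(cx, cy)]) ++ (rest ++ P)).toFinset)
            = ((pvOilset land).toFinset \ (V₀ ∪ (done ++ (cx, cy) :: rest).toFinset)) \ P.toFinset := by
          rw [hdq_eq]
          ext a
          simp only [Finset.mem_sdiff, Finset.mem_union, List.mem_toFinset, List.mem_append]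
          tauto
        have hPsub : P.toFinset ⊆ (pvOilset land).toFinset \ (V₀ ∪ (done ++ (cx, cy) :: rest).toFinset) := by
          intro a ha
          rw [List.mem_toFinset] at ha
          simp only [Finset.mem_sdiff, Finset.mem_union, List.mem_toFinset]
          refine ⟨mem_pvOilset.2 (hP3 a ha).2.1, ?_⟩
          rintro (h | h)
          · exact (hPnot a ha).1 h
          · exact (hPnot a ha).2 h
        rw [hUeq, Finset.card_sdiff, Finset.inter_eq_left.2 hPsub, List.toFinset_card_of_nodup hP2]
        have hcle := Finset.card_le_card hPsub
        rw [List.toFinset_card_of_nodup hP2] at hcle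
        simp only [List.length_append, List.length_cons] at h9 ⊢
        omega
      obtain ⟨c1', c2', c3', c4', c5'⟩ := ih (rest ++ P) (done ++ [(cx, cy)]) (count + 1)
        (pvDirs.foldl (pvPush land (pvColN land) (pvRowN land) cx cy) (rest, visited, arr)).2.1
        (pvDirs.foldl (pvPush land (pvColN land) (pvRowN land) cx cy) (rest, visited, arr)).2.2
        hP5 hnd' h3' h4' h5' h7' h9' hP7
      refine ⟨?_, c2', ?_, c4', c5'⟩
      · rw [c1']
        have hcC : (cx, cy) ∈ (pvCompFor land z).toFinset := by
          rw [List.mem_toFinset, mem_pvCompFor hz]; exact hcr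
        have hcd : (cx, cy) ∉ done.toFinset := by
          rw [List.mem_toFinset]
          intro h
          have := List.nodup_append.1 hnd
          exact this.2.2 (cx, cy) h (cx, cy) List.mem_cons_self rfl
        have hdf : (done ++ [(cx, cy)]).toFinset = insert (cx, cy) done.toFinset := by
          ext a; simp [List.mem_toFinset, or_comm]
        have herase : (pvCompFor land z).toFinset \ (done ++ [(cx, cy)]).toFinset
            = ((pvCompFor land z).toFinset \ done.toFinset).erase (cx, cy) := by
          rw [hdf]; ext a
          simp only [Finset.mem_sdiff, Finset.mem_insert, Finset.mem_erase]
          tauto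
        have hmem : (cx, cy) ∈ (pvCompFor land z).toFinset \ done.toFinset :=
          Finset.mem_sdiff.2 ⟨hcC, hcd⟩
        have hcard := Finset.card_erase_of_mem hmem
        have hpos : 1 ≤ ((pvCompFor land z).toFinset \ done.toFinset).card :=
          Finset.card_pos.2 ⟨_, hmem⟩ 
        rw [herase, hcard]
        omega
      · intro k
        rw [c3' k, hP8 k]
        have hPcomp : ∀ u ∈ P, u ∈ pvCompFor land z := by
          intro u hu; rw [mem_pvCompFor hz]; exact hPreach u hu
        constructor
        · rintro ((h | ⟨u, hu, he⟩) | ⟨w, hw, hnw, he⟩)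
          · exact Or.inl h
          · exact Or.inr ⟨u, hPcomp u hu, (hPnot u hu).2, he⟩
          · refine Or.inr ⟨w, hw, ?_, he⟩
            intro hmem
            exact hnw (by rw [hdq_eq, List.mem_append]; exact Or.inl hmem)
        · rintro (h | ⟨w, hw, hnw, he⟩)
          · exact Or.inl (Or.inl h)
          · by_cases hwP : w ∈ P
            · exact Or.inl (Or.inr ⟨w, hwP, he⟩)
            · refine Or.inr ⟨w, hw, ?_, he⟩
              rw [hdq_eq, List.mem_append]
              rintro (h | h)
              · exact hnw h
              · exact hwP h

theorem pvDfs_spec {land : List (List Int)} {z : Int × Int} {V₀ : Finset (Int × Int)}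
    {visited : List (List Bool)}
    (hz : pvOil land z) (hznv : z ∉ V₀)
    (hV₀cl : ∀ a ∈ V₀, ∀ u, pvAdj land a u → u ∈ V₀)
    (hs : pvShape land visited)
    (hv : ∀ w, pvInGrid land w → (pvVm visited w ↔ w ∈ V₀)) :
    (pvDfs land (pvColN land) (pvRowN land) z.1 z.2 visited).1
        = ((pvCompFor land z).length : Int) ∧
    (pvDfs land (pvColN land) (pvRowN land) z.1 z.2 visited).2.1.Nodup ∧
    (∀ k, k ∈ (pvDfs land (pvColN land) (pvRowN land) z.1 z.2 visited).2.1 ↔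
        k ∈ (pvCompFor land z).map Prod.snd) ∧
    pvShape land (pvDfs land (pvColN land) (pvRowN land) z.1 z.2 visited).2.2 ∧
    (∀ w, pvInGrid land w →
      (pvVm (pvDfs land (pvColN land) (pvRowN land) z.1 z.2 visited).2.2 w ↔
        (w ∈ V₀ ∨ w ∈ pvCompFor land z))) := by
  have hgz : pvInGrid land (z.1, z.2) := hz.1
  have hfuel : (2 * (((pvColN land : Nat) : Int) * ((pvRowN land : Nat) : Int)).toNat + 1)
      = 2 * (pvColN land * pvRowN land) + 1 := by
    rw [show ((pvColN land : Nat) : Int) * ((pvRowN land : Nat) : Int)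
        = ((pvColN land * pvRowN land : Nat) : Int) from by push_cast; ring, Int.toNat_natCast]
  have harr : (PySem.Set.add PySem.Set.empty z.2) = [z.2] := rfl
  have hspec := pvBfs_spec hz hV₀cl (2 * (pvColN land * pvRowN land) + 1)
    [(z.1, z.2)] [] 0 (pvVset visited z.1 z.2) [z.2]
    (pvShape_vset hs hgz.1 hgz.2.1)
    (by simp)
    (by
      intro w hw
      simp only [List.nil_append, List.mem_singleton] at hw
      subst hw
      exact ⟨hz, Relation.ReflTransGen.refl, hznv⟩)
    (by
      intro w hw
      rw [show pvVm (pvVset visited z.1 z.2) w ↔ (pvVm visited w ∨ w = (z.1, z.2)) from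
        pvVm_vset hs hgz hw, hv w hw]
      simp)
    (by simp)
    (by simp)
    (by
      have h1 : ((pvOilset land).toFinset \ (V₀ ∪ ([] ++ [(z.1, z.2)]).toFinset)).card
          ≤ pvColN land * pvRowN land := by
        calc ((pvOilset land).toFinset \ (V₀ ∪ ([] ++ [(z.1, z.2)]).toFinset)).card
            ≤ (pvOilset land).toFinset.card := Finset.card_le_card Finset.sdiff_subset
          _ ≤ (pvOilset land).length := List.toFinset_card_le _
          _ ≤ pvColN land * pvRowN land := length_pvOilset_le land
      simp only [List.length_singleton]
      omega)
    (by simp)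
  unfold pvDfs
  rw [hfuel, harr] at *
  obtain ⟨c1, c2, c3, c4, c5⟩ := hspec
  refine ⟨?_, c2, ?_, c4, c5⟩
  · rw [c1, List.toFinset_nil, Finset.sdiff_empty,
      List.toFinset_card_of_nodup (pvCompFor_nodup hz)]
    simp
  · intro k
    rw [c3 k]
    simp only [List.mem_singleton, List.nil_append, List.mem_map]
    constructor
    · rintro (rfl | ⟨w, hw, _, he⟩)
      · exact ⟨z, self_mem_pvCompFor hz, rfl⟩
      · exact ⟨w, hw, he⟩
    · rintro ⟨w, hw, he⟩
      by_cases hwz : w = (z.1, z.2)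
      · subst hwz; exact Or.inl he.symm
      · exact Or.inr ⟨w, hw, by simpa using hwz, he⟩

-- ---------- outer loops ----------

theorem pvReach_closed {land : List (List Int)} {V : Finset (Int × Int)}
    (hcl : ∀ a ∈ V, ∀ u, pvAdj land a u → u ∈ V) {a b : Int × Int} (ha : a ∈ V)
    (h : pvReach land a b) : b ∈ V := by
  induction h with
  | refl => exact ha
  | @tail p q hap hadj ih => exact hcl p ih q hadj

-- a cell of a component is never in a closed set avoiding the start
theorem comp_disjoint {land : List (List Int)} {V : Finset (Int × Int)} {z : Int × Int}
    (hz : pvOil land z) (hznV : z ∉ V)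
    (hcl : ∀ a ∈ V, ∀ u, pvAdj land a u → u ∈ V) :
    ∀ w ∈ (pvCompFor land z).toFinset, w ∉ V := by
  intro w hw hwV
  rw [List.mem_toFinset, mem_pvCompFor hz] at hw
  exact hznV (pvReach_closed hcl hwV (pvReach_symm hw))

-- body of A's inner loop, in the spelling used by the proofs (definitionally equal to the port's)
def pvStepA (land : List (List Int)) (y : Int) (st : List Int × List (List Bool)) (x : Int) :
    List Int × List (List Bool) :=
  if pvVget st.2 x y = false ∧ pvCell land x y ≠ 0 then
    ((pvDfs land (pvColN land) (pvRowN land) x y st.2).2.1.foldl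
        (fun l a => PySem.List.pySetD l a
          (PySem.List.pyGetD l a 0 + (pvDfs land (pvColN land) (pvRowN land) x y st.2).1)) st.1,
     (pvDfs land (pvColN land) (pvRowN land) x y st.2).2.2)
  else st

-- body of B's loop, in the spelling used by the proofs (definitionally equal to the port's)
def pvStepB (land : List (List Int)) (st : List Int × PySem.Set (Int × Int)) (z : Int × Int) :
    List Int × PySem.Set (Int × Int) :=
  if PySem.Set.contains st.2 z then st
  else
    ((PySem.Set.ofList ((pvCompFor land z).map Prod.snd)).foldl
        (fun l c => PySem.List.pySetD l c
          (PySem.List.pyGetD l c 0 + ((pvCompFor land z).length : Int))) st.1,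
     PySem.Set.union st.2 (pvCompFor land z))

def pvInvA (land : List (List Int)) (st : List Int × List (List Bool))
    (V : Finset (Int × Int)) : Prop :=
  pvShape land st.2 ∧
  (∀ w, pvInGrid land w → (pvVm st.2 w ↔ w ∈ V)) ∧
  (∀ a ∈ V, pvOil land a) ∧
  (∀ a ∈ V, ∀ u, pvAdj land a u → u ∈ V) ∧
  st.1.length = pvRowN land ∧
  (∀ j : Nat, j < pvRowN land → st.1.getD j 0 = (pvCnt land V j : Int))

def pvInvB (land : List (List Int)) (st : List Int × PySem.Set (Int × Int))
    (V : Finset (Int × Int)) : Prop :=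
  st.2.Nodup ∧
  (∀ w, w ∈ st.2 ↔ w ∈ V) ∧
  (∀ a ∈ V, pvOil land a) ∧
  (∀ a ∈ V, ∀ u, pvAdj land a u → u ∈ V) ∧
  st.1.length = pvRowN land ∧
  (∀ j : Nat, j < pvRowN land → st.1.getD j 0 = (pvCnt land V j : Int))

-- adding one whole component to the state preserves the invariant (shared by both step lemmas)
theorem pvCnt_step {land : List (List Int)} {V : Finset (Int × Int)} {z : Int × Int}
    (hz : pvOil land z)
    (hoil : ∀ a ∈ V, pvOil land a)
    (hcl : ∀ a ∈ V, ∀ u, pvAdj land a u → u ∈ V) :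
    (∀ a ∈ V ∪ (pvCompFor land z).toFinset, pvOil land a) ∧
    (∀ a ∈ V ∪ (pvCompFor land z).toFinset, ∀ u, pvAdj land a u →
      u ∈ V ∪ (pvCompFor land z).toFinset) := by
  constructor
  · intro a ha
    rcases Finset.mem_union.1 ha with h | h
    · exact hoil a h
    · exact oil_of_mem_pvCompFor hz (List.mem_toFinset.1 h)
  · intro a ha u hadj
    rcases Finset.mem_union.1 ha with h | h
    · exact Finset.mem_union_left _ (hcl a h u hadj)
    · refine Finset.mem_union_right _ ?_
      rw [List.mem_toFinset, mem_pvCompFor hz] at h ⊢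
      exact h.tail hadj

theorem pvStepA_spec {land : List (List Int)} {y x : Int} {st : List Int × List (List Bool)}
    {V : Finset (Int × Int)} (hInv : pvInvA land st V)
    (hx : 0 ≤ x ∧ x < ((pvColN land : Nat) : Int)) (hy : 0 ≤ y ∧ y < ((pvRowN land : Nat) : Int)) :
    ∃ V', pvInvA land (pvStepA land y st x) V' ∧ V ⊆ V' ∧ (pvOil land (x, y) → (x, y) ∈ V') := by
  obtain ⟨hsh, hvm, hoil, hcl, hlen, hval⟩ := hInv
  have hg : pvInGrid land (x, y) := ⟨hx.1, hx.2, hy.1, hy.2⟩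
  unfold pvStepA
  by_cases hcond : pvVget st.2 x y = false ∧ pvCell land x y ≠ 0
  · rw [if_pos hcond]
    have hzoil : pvOil land (x, y) := ⟨hg, hcond.2⟩
    have hznV : (x, y) ∉ V := by
      intro h
      have := (hvm (x, y) hg).2 h
      unfold pvVm at this
      simp only at this
      rw [hcond.1] at this
      cases this
    obtain ⟨c1, c2, c3, c4, c5⟩ := pvDfs_spec (z := (x, y)) (V₀ := V) hzoil hznV hcl hsh
      (fun w hw => hvm w hw)
    obtain ⟨hoil', hcl'⟩ := pvCnt_step hzoil hoil hcl
    refine ⟨V ∪ (pvCompFor land (x, y)).toFinset, ⟨c4, ?_, hoil', hcl', ?_, ?_⟩,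
      Finset.subset_union_left, fun _ => Finset.mem_union_right _
        (List.mem_toFinset.2 (self_mem_pvCompFor hzoil))⟩
    · intro w hw
      rw [c5 w hw, Finset.mem_union, List.mem_toFinset]
    · rw [(bump_fold _ st.1 c2 ?_).1, hlen]
      intro c hc
      obtain ⟨w, hwm, hwe⟩ := List.mem_map.1 ((c3 c).1 hc)
      have := (oil_of_mem_pvCompFor hzoil hwm).1
      rw [hlen]
      subst hwe
      exact ⟨this.2.2.1, this.2.2.2⟩
    · intro j hj
      have hrange : ∀ c ∈ (pvDfs land (pvColN land) (pvRowN land) x y st.2).2.1,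
          0 ≤ c ∧ c < (st.1.length : Int) := by
        intro c hc
        obtain ⟨w, hwm, hwe⟩ := List.mem_map.1 ((c3 c).1 hc)
        have := (oil_of_mem_pvCompFor hzoil hwm).1
        rw [hlen]
        subst hwe
        exact ⟨this.2.2.1, this.2.2.2⟩
      rw [(bump_fold _ st.1 c2 hrange).2 j (by rw [hlen]; exact hj), hval j hj, c1,
        pvCnt_union hzoil (comp_disjoint hzoil hznV hcl) j]
      have hiff : ((j : Int) ∈ (pvDfs land (pvColN land) (pvRowN land) x y st.2).2.1)
          ↔ (j : Int) ∈ (pvCompFor land (x, y)).map Prod.snd := c3 (j : Int)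
      by_cases hmem : (j : Int) ∈ (pvCompFor land (x, y)).map Prod.snd
      · rw [if_pos (hiff.2 hmem), if_pos hmem]
        push_cast
        ring
      · rw [if_neg (fun h => hmem (hiff.1 h)), if_neg hmem]
        simp
  · rw [if_neg hcond]
    refine ⟨V, ⟨hsh, hvm, hoil, hcl, hlen, hval⟩, Finset.Subset.refl V, ?_⟩
    intro ho
    have : ¬ pvVget st.2 x y = false := fun h => hcond ⟨h, ho.2⟩
    have hvmv : pvVm st.2 (x, y) := by
      unfold pvVm
      simp only
      cases hb : pvVget st.2 x y
      · exact absurd hb this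
      · rfl
    exact (hvm (x, y) hg).1 hvmv

theorem pvStepB_spec {land : List (List Int)} {z : Int × Int} {st : List Int × PySem.Set (Int × Int)}
    {V : Finset (Int × Int)} (hInv : pvInvB land st V) (hz : pvOil land z) :
    ∃ V', pvInvB land (pvStepB land st z) V' ∧ V ⊆ V' ∧ z ∈ V' := by
  obtain ⟨hnd, hvm, hoil, hcl, hlen, hval⟩ := hInv
  unfold pvStepB
  by_cases hcond : PySem.Set.contains st.2 z = true
  · rw [if_pos hcond]
    exact ⟨V, ⟨hnd, hvm, hoil, hcl, hlen, hval⟩, Finset.Subset.refl V,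
      (hvm z).1 ((PySem.Set.contains_iff _ _).1 hcond)⟩
  · rw [if_neg hcond]
    have hznV : z ∉ V := by
      intro h
      exact hcond ((PySem.Set.contains_iff _ _).2 ((hvm z).2 h))
    obtain ⟨hoil', hcl'⟩ := pvCnt_step hz hoil hcl
    have hndc := pvCompFor_nodup hz
    refine ⟨V ∪ (pvCompFor land z).toFinset, ⟨PySem.Set.nodup_union _ _ hnd, ?_, hoil', hcl', ?_, ?_⟩,
      Finset.subset_union_left, Finset.mem_union_right _
        (List.mem_toFinset.2 (self_mem_pvCompFor hz))⟩
    · intro w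
      rw [PySem.Set.mem_union, hvm w, Finset.mem_union, List.mem_toFinset]
    · rw [(bump_fold _ st.1 (PySem.Set.nodup_ofList _) ?_).1, hlen]
      intro c hc
      obtain ⟨w, hwm, hwe⟩ := List.mem_map.1 ((PySem.Set.mem_ofList _ _).1 hc)
      have := (oil_of_mem_pvCompFor hz hwm).1
      rw [hlen]
      subst hwe
      exact ⟨this.2.2.1, this.2.2.2⟩
    · intro j hj
      have hrange : ∀ c ∈ PySem.Set.ofList ((pvCompFor land z).map Prod.snd),
          0 ≤ c ∧ c < (st.1.length : Int) := by
        intro c hc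
        obtain ⟨w, hwm, hwe⟩ := List.mem_map.1 ((PySem.Set.mem_ofList _ _).1 hc)
        have := (oil_of_mem_pvCompFor hz hwm).1
        rw [hlen]
        subst hwe
        exact ⟨this.2.2.1, this.2.2.2⟩
      rw [(bump_fold _ st.1 (PySem.Set.nodup_ofList _) hrange).2 j (by rw [hlen]; exact hj),
        hval j hj, pvCnt_union hz (comp_disjoint hz hznV hcl) j]
      by_cases hmem : (j : Int) ∈ (pvCompFor land z).map Prod.snd
      · rw [if_pos ((PySem.Set.mem_ofList _ _).2 hmem), if_pos hmem]
        push_cast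
        ring
      · rw [if_neg (fun h => hmem ((PySem.Set.mem_ofList _ _).1 h)), if_neg hmem]
        simp

theorem pvLoopA_inner {land : List (List Int)} {y : Int}
    (hy : 0 ≤ y ∧ y < ((pvRowN land : Nat) : Int)) :
    ∀ (xs : List Int) (st : List Int × List (List Bool)) (V : Finset (Int × Int)),
      pvInvA land st V → (∀ x ∈ xs, 0 ≤ x ∧ x < ((pvColN land : Nat) : Int)) →
      ∃ V', pvInvA land (xs.foldl (pvStepA land y) st) V' ∧ V ⊆ V' ∧
        (∀ x ∈ xs, pvOil land (x, y) → (x, y) ∈ V') := by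
  intro xs
  induction xs with
  | nil => intro st V hInv _; exact ⟨V, hInv, Finset.Subset.refl V, by simp⟩
  | cons x xs ih =>
    intro st V hInv hxs
    obtain ⟨V₁, hInv₁, hsub₁, hcov₁⟩ :=
      pvStepA_spec hInv (hxs x List.mem_cons_self) hy
    obtain ⟨V', hInv', hsub', hcov'⟩ := ih (pvStepA land y st x) V₁ hInv₁
      (fun x' hx' => hxs x' (List.mem_cons_of_mem _ hx'))
    refine ⟨V', by simpa using hInv', hsub₁.trans hsub', ?_⟩
    intro x' hx' ho
    rcases List.mem_cons.1 hx' with rfl | hx''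
    · exact hsub' (hcov₁ ho)
    · exact hcov' x' hx'' ho

theorem pvLoopA_outer {land : List (List Int)} :
    ∀ (ys : List Int) (st : List Int × List (List Bool)) (V : Finset (Int × Int)),
      pvInvA land st V → (∀ y ∈ ys, 0 ≤ y ∧ y < ((pvRowN land : Nat) : Int)) →
      ∃ V', pvInvA land (ys.foldl (fun st y =>
          (PySem.List.pyRange 0 ((pvColN land : Nat) : Int) 1).foldl (pvStepA land y) st) st) V' ∧
        V ⊆ V' ∧ (∀ w, pvOil land w → w.2 ∈ ys → w ∈ V') := by
  intro ys
  induction ys with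
  | nil => intro st V hInv _; exact ⟨V, hInv, Finset.Subset.refl V, by simp⟩
  | cons y ys ih =>
    intro st V hInv hys
    obtain ⟨V₁, hInv₁, hsub₁, hcov₁⟩ := pvLoopA_inner (hys y List.mem_cons_self)
      (PySem.List.pyRange 0 ((pvColN land : Nat) : Int) 1) st V hInv
      (fun x hx => PySem.List.mem_pyRange_one.1 hx)
    obtain ⟨V', hInv', hsub', hcov'⟩ := ih _ V₁ hInv₁
      (fun y' hy' => hys y' (List.mem_cons_of_mem _ hy'))
    refine ⟨V', by simpa using hInv', hsub₁.trans hsub', ?_⟩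
    intro w ho hw
    rcases List.mem_cons.1 hw with hw1 | hw2
    · have hx : w.1 ∈ PySem.List.pyRange 0 ((pvColN land : Nat) : Int) 1 :=
        PySem.List.mem_pyRange_one.2 ⟨ho.1.1, ho.1.2.1⟩
      have : (w.1, y) ∈ V₁ := hcov₁ w.1 hx (by rw [← hw1]; exact ho)
      rw [show (w.1, y) = w from by rw [← hw1]] at this
      exact hsub' this
    · exact hcov' w ho hw2

theorem pvLoopB {land : List (List Int)} :
    ∀ (zs : List (Int × Int)) (st : List Int × PySem.Set (Int × Int)) (V : Finset (Int × Int)),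
      pvInvB land st V → (∀ z ∈ zs, pvOil land z) →
      ∃ V', pvInvB land (zs.foldl (pvStepB land) st) V' ∧ V ⊆ V' ∧ (∀ z ∈ zs, z ∈ V') := by
  intro zs
  induction zs with
  | nil => intro st V hInv _; exact ⟨V, hInv, Finset.Subset.refl V, by simp⟩
  | cons z zs ih =>
    intro st V hInv hzs
    obtain ⟨V₁, hInv₁, hsub₁, hz₁⟩ := pvStepB_spec hInv (hzs z List.mem_cons_self)
    obtain ⟨V', hInv', hsub', hcov'⟩ := ih (pvStepB land st z) V₁ hInv₁
      (fun z' hz' => hzs z' (List.mem_cons_of_mem _ hz'))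
    refine ⟨V', by simpa using hInv', hsub₁.trans hsub', ?_⟩
    intro z' hz'
    rcases List.mem_cons.1 hz' with rfl | hz''
    · exact hsub' hz₁
    · exact hcov' z' hz''

-- the two ports, restated through the proof-side step functions (definitional)
theorem solution_eq (land : List (List Int)) :
    solution land =
      (PySem.List.max? ((PySem.List.pyRange 0 ((pvRowN land : Nat) : Int) 1).foldl
          (fun st y => (PySem.List.pyRange 0 ((pvColN land : Nat) : Int) 1).foldl
            (pvStepA land y) st)
          (List.replicate (pvRowN land) (0 : Int),
           List.replicate (pvColN land) (List.replicate (pvRowN land) false))).1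
        (fun v => v)).getD 0 := rfl

theorem solution_alt_eq (land : List (List Int)) :
    solution_alt land =
      (PySem.List.max? ((PySem.List.sorted2 (pvOilset land) Prod.fst Prod.snd false).foldl
          (pvStepB land)
          (List.replicate (pvRowN land) (0 : Int), PySem.Set.empty)).1
        (fun v => v)).getD 0 := rfl

theorem pvCnt_empty (land : List (List Int)) (c : Int) : pvCnt land ∅ c = 0 := by
  unfold pvCnt
  simp

-- both final per-column lists agree entry by entry
theorem final_lists_eq (land : List (List Int)) :
    ((PySem.List.pyRange 0 ((pvRowN land : Nat) : Int) 1).foldl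
        (fun st y => (PySem.List.pyRange 0 ((pvColN land : Nat) : Int) 1).foldl
          (pvStepA land y) st)
        (List.replicate (pvRowN land) (0 : Int),
         List.replicate (pvColN land) (List.replicate (pvRowN land) false))).1
      = ((PySem.List.sorted2 (pvOilset land) Prod.fst Prod.snd false).foldl
          (pvStepB land)
          (List.replicate (pvRowN land) (0 : Int), PySem.Set.empty)).1 := by
  have hInvA0 : pvInvA land
      (List.replicate (pvRowN land) (0 : Int),
       List.replicate (pvColN land) (List.replicate (pvRowN land) false)) ∅ := by
    refine ⟨pvShape_replicate land, ?_, by simp, by simp, by simp, ?_⟩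
    · intro w hw
      simp only [Finset.notMem_empty, iff_false]
      exact pvVm_replicate hw
    · intro j hj
      rw [pvCnt_empty, List.getD_eq_getElem _ _ (by simpa using hj), List.getElem_replicate]
      simp
  obtain ⟨VA, hInvA, _, hcovA⟩ := pvLoopA_outer (PySem.List.pyRange 0 ((pvRowN land : Nat) : Int) 1)
    _ ∅ hInvA0 (fun y hy => PySem.List.mem_pyRange_one.1 hy)
  have hVA : VA = (pvOilset land).toFinset := by
    ext a
    rw [List.mem_toFinset, mem_pvOilset]
    constructor
    · exact fun h => hInvA.2.2.1 a h
    · intro ho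
      have := hcovA a ho (PySem.List.mem_pyRange_one.2 ⟨ho.1.2.2.1, ho.1.2.2.2⟩)
      exact this
  have hInvB0 : pvInvB land (List.replicate (pvRowN land) (0 : Int), PySem.Set.empty) ∅ := by
    refine ⟨List.nodup_nil, by simp [PySem.Set.empty], by simp, by simp, by simp, ?_⟩
    intro j hj
    rw [pvCnt_empty, List.getD_eq_getElem _ _ (by simpa using hj), List.getElem_replicate]
    simp
  obtain ⟨VB, hInvB, _, hcovB⟩ := pvLoopB (PySem.List.sorted2 (pvOilset land) Prod.fst Prod.snd false)
    _ ∅ hInvB0 (fun z hz => mem_pvOilset.1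
      ((PySem.List.sorted2_perm (pvOilset land) Prod.fst Prod.snd false).mem_iff.1 hz))
  have hVB : VB = (pvOilset land).toFinset := by
    ext a
    rw [List.mem_toFinset, mem_pvOilset]
    constructor
    · exact fun h => hInvB.2.2.1 a h
    · intro ho
      refine hcovB a ?_
      rw [(PySem.List.sorted2_perm (pvOilset land) Prod.fst Prod.snd false).mem_iff]
      exact mem_pvOilset.2 ho
  apply List.ext_getElem
  · rw [hInvA.2.2.2.2.1, hInvB.2.2.2.2.1]
  · intro j hjA hjB
    have hjr : j < pvRowN land := by rw [← hInvA.2.2.2.2.1]; exact hjA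
    have hA := hInvA.2.2.2.2.2 j hjr
    have hB := hInvB.2.2.2.2.2 j hjr
    rw [hVA] at hA
    rw [hVB] at hB
    rw [List.getD_eq_getElem _ _ hjA] at hA
    rw [List.getD_eq_getElem _ _ hjB] at hB
    rw [hA, hB]

-- ===== VERDICT (by name: the statement is the Claim_ definition above) =====
theorem solution_spec : Claim_equal_solution := by
  intro land _ _
  unfold Spec_solution
  rw [solution_eq, solution_alt_eq, final_lists_eq]
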